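-- pv_equiv track=rewrite | github.com/shreyaaaa06/legal-document-simplifier | legal-doc-simplifier/backend/routes/agents.py | extract_deadlines_from_text
-- ===== SOURCE A (Python) =====
-- def extract_deadlines_from_text(text):
--     """Extract deadline text from clause text"""
--     deadline_keywords = [
--         'due by', 'due on', 'within', 'before', 'after', 'deadline',
--         'must be completed', 'required by', 'payment due', 'expires on'
--     ]
--
--     deadlines = []
--     text_lower = text.lower()
--
--     for keyword in deadline_keywords:
--         if keyword in text_lower:
--             # Find sentences containing deadline keywords
--             sentences = text.split('.')
--             for sentence in sentences:
--                 if keyword in sentence.lower():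
--                     # Clean and add the sentence as a deadline
--                     clean_sentence = sentence.strip()
--                     if clean_sentence and len(clean_sentence) > 10:
--                         deadlines.append(clean_sentence)
--                         break  # Only take first match per keyword
--
--     return deadlines[:3]  # Limit to 3 deadlines per clause
-- ===== SOURCE B (Python) =====
-- def extract_deadlines_from_text(text):
--     """Extract deadline text from clause text"""
--     deadline_keywords = [
--         'due by', 'due on', 'within', 'before', 'after', 'deadline',
--         'must be completed', 'required by', 'payment due', 'expires on'
--     ]
--
--     # One pass over the sentences: record, for each keyword, the first
--     # qualifying sentence (keyword present and stripped length > 10).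
--     first_match = {}
--     for sentence in text.split('.'):
--         low = sentence.lower()
--         for keyword in deadline_keywords:
--             if keyword not in first_match and keyword in low:
--                 clean = sentence.strip()
--                 if len(clean) > 10:
--                     first_match[keyword] = clean
--
--     # Emit in the fixed keyword order, capped at 3.
--     return [first_match[k] for k in deadline_keywords if k in first_match][:3]
-- ===== Notes on version B (the rewrite author's own statement) =====
-- stated objective: alternative
-- what changed: A splits the text anew for every keyword and scans the sentence list once per keyword (keyword-outer nested loops with break); B splits once, makes a single pass over the sentences building a first-qualifying-sentence index per keyword, then emits the recorded sentences in keyword order capped at 3.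
import Mathlib
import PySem

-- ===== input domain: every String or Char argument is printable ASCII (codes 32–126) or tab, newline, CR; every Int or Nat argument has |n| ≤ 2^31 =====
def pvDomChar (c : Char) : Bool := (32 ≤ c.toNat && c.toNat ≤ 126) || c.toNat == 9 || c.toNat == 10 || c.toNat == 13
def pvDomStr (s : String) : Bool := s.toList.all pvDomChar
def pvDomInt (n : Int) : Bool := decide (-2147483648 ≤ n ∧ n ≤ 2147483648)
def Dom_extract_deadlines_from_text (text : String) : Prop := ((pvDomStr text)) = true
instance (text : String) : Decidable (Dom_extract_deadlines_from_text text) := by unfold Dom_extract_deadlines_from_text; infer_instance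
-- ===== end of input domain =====

-- B rebuilds the result as one split + one sentence pass recording each keyword's first
-- qualifying sentence, instead of A's per-keyword re-split and re-scan (objective: alternative).

-- ===== PORT A =====
def pvKeywordsA : List String :=
  ["due by", "due on", "within", "before", "after", "deadline",
   "must be completed", "required by", "payment due", "expires on"]

-- A's inner sentence loop: append the first qualifying sentence, then break.
def pvScanA (kw : String) : List String → List String → List String
  | [], acc => acc
  | sentence :: rest, acc =>
    if PySem.Str.isIn kw (PySem.Str.lower sentence) then
      let clean := PySem.Str.strip sentence
      if (clean != "") && decide ((10 : Int) < PySem.Str.len clean) then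
        acc ++ [clean]  -- break
      else pvScanA kw rest acc
    else pvScanA kw rest acc

def extract_deadlines_from_text (text : String) : List String :=
  let text_lower := PySem.Str.lower text
  let deadlines := pvKeywordsA.foldl (fun acc kw =>
    if PySem.Str.isIn kw text_lower then
      -- text.split('.') recomputed inside the loop, as A does; sep "." ≠ "" so split? is `some`
      pvScanA kw ((PySem.Str.split? text ".").getD []) acc
    else acc) []
  PySem.List.slice deadlines none (some 3)

-- ===== PORT B =====
def pvKeywordsB : List String :=
  ["due by", "due on", "within", "before", "after", "deadline",
   "must be completed", "required by", "payment due", "expires on"]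

def extract_deadlines_from_text_alt (text : String) : List String :=
  let first_match := ((PySem.Str.split? text ".").getD []).foldl (fun d sentence =>
    let low := PySem.Str.lower sentence
    pvKeywordsB.foldl (fun (d : PySem.Dict String String) kw =>
      if !d.contains kw && PySem.Str.isIn kw low then
        let clean := PySem.Str.strip sentence
        if decide ((10 : Int) < PySem.Str.len clean) then d.insert kw clean else d
      else d) d) PySem.Dict.empty
  PySem.List.slice (pvKeywordsB.filterMap (fun kw => first_match.get? kw)) none (some 3)

-- ===== PRECONDITION & SPEC =====
def Spec_extract_deadlines_from_text (text : String) (out : List String) : Prop := out = extract_deadlines_from_text_alt text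
instance (text : String) (out : List String) : Decidable (Spec_extract_deadlines_from_text text out) := by unfold Spec_extract_deadlines_from_text; infer_instance

-- ===== CLAIM (what is proved, stated in full; the proofs are below) =====
def Claim_equal_extract_deadlines_from_text : Prop := ∀ (text : String), Dom_extract_deadlines_from_text text → Spec_extract_deadlines_from_text text (extract_deadlines_from_text text)

-- ===== LEMMAS AND PROOFS =====

-- a sentence qualifies for a keyword: keyword in its lowering, stripped length > 10
def pvQual (kw s : String) : Bool :=
  PySem.Str.isIn kw (PySem.Str.lower s) && decide ((10 : Int) < PySem.Str.len (PySem.Str.strip s))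

-- the first qualifying sentence of the list, stripped
def pvFirstHit (kw : String) (sents : List String) : Option String :=
  sents.findSome? (fun s => if pvQual kw s then some (PySem.Str.strip s) else none)

-- B's per-keyword update for one sentence (definitionally the lambda in B's port)
def pvStepB (sentence : String) (d : PySem.Dict String String) (k : String) : PySem.Dict String String :=
  if !d.contains k && PySem.Str.isIn k (PySem.Str.lower sentence) then
    let clean := PySem.Str.strip sentence
    if decide ((10 : Int) < PySem.Str.len clean) then d.insert k clean else d
  else d

theorem pv_strip_ne {s : String} (h : 10 < (PySem.Chars.strip s.toList).length) :
    ¬ PySem.Str.strip s = "" := by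
  intro he
  have h0 : (PySem.Chars.strip s.toList).length = 0 := by
    have := congrArg String.toList he
    simp at this
    simp [this]
  omega

theorem pvScanA_eq (kw : String) (sents : List String) (acc : List String) :
    pvScanA kw sents acc = acc ++ (pvFirstHit kw sents).toList := by
  induction sents generalizing acc with
  | nil => simp [pvScanA, pvFirstHit]
  | cons s rest ih =>
    by_cases hin : PySem.Chars.isIn kw.toList (PySem.Chars.lower s.toList) = true
    · by_cases hlen : 10 < (PySem.Chars.strip s.toList).length
      · have hne := pv_strip_ne hlen
        simp [pvScanA, pvFirstHit, pvQual, hin, hlen, hne]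
      · simp [pvScanA, pvFirstHit, pvQual, hin, hlen, ih]
    · simp [pvScanA, pvFirstHit, pvQual, hin, ih]

-- definitional unfoldings of PySem.Chars.splitOn.go
theorem pv_go_zero (sep l cur acc) : PySem.Chars.splitOn.go sep 0 l cur acc = ((cur.reverse ++ l) :: acc).reverse := rfl
theorem pv_go_succ_nil (sep fuel cur acc) : PySem.Chars.splitOn.go sep (fuel+1) [] cur acc = (cur.reverse :: acc).reverse := rfl
theorem pv_go_succ_cons (sep fuel c rest cur acc) : PySem.Chars.splitOn.go sep (fuel+1) (c::rest) cur acc =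
    if sep.isPrefixOf (c :: rest) then PySem.Chars.splitOn.go sep fuel (List.drop sep.length (c :: rest)) [] (cur.reverse :: acc)
    else PySem.Chars.splitOn.go sep fuel rest (c :: cur) acc := rfl

-- every piece splitOn.go produces is an accumulator piece or an infix of cur.reverse ++ l
theorem pv_go_mem (sep : List Char) (fuel : Nat) (l cur : List Char) (acc : List (List Char)) :
    ∀ p ∈ PySem.Chars.splitOn.go sep fuel l cur acc, p ∈ acc ∨ p <:+: (cur.reverse ++ l) := by
  induction fuel generalizing l cur acc with
  | zero =>
    intro p hp
    rw [pv_go_zero] at hp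
    simp at hp
    rcases hp with h | h
    · exact Or.inl h
    · exact Or.inr (h ▸ List.infix_rfl)
  | succ fuel ih =>
    intro p hp
    cases l with
    | nil =>
      rw [pv_go_succ_nil] at hp
      simp at hp
      rcases hp with h | h
      · exact Or.inl h
      · exact Or.inr (h ▸ ((List.prefix_append cur.reverse []).isInfix))
    | cons c rest =>
      rw [pv_go_succ_cons] at hp
      by_cases hpre : sep.isPrefixOf (c :: rest) = true
      · rw [if_pos hpre] at hp
        rcases ih _ _ _ p hp with h | h
        · rcases List.mem_cons.mp h with h | h
          · exact Or.inr (h ▸ (cur.reverse.prefix_append (c :: rest)).isInfix)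
          · exact Or.inl h
        · simp only [List.reverse_nil, List.nil_append] at h
          exact Or.inr (h.trans ((List.drop_suffix _ _).isInfix.trans (List.suffix_append cur.reverse (c :: rest)).isInfix))
      · rw [if_neg hpre] at hp
        rcases ih _ _ _ p hp with h | h
        · exact Or.inl h
        · refine Or.inr ?_
          have e : (c :: cur).reverse ++ rest = cur.reverse ++ (c :: rest) := by simp
          rwa [e] at h

theorem pv_splitOn_infix (s sep : List Char) :
    ∀ p ∈ PySem.Chars.splitOn s sep, p <:+: s := by
  intro p hp
  have := pv_go_mem sep (s.length + 1) s [] [] p hp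
  simpa using this

-- if the keyword is absent from the lowered text, no sentence of the split qualifies
theorem pv_firstHit_none (text kw : String)
    (h : PySem.Str.isIn kw (PySem.Str.lower text) = false) :
    pvFirstHit kw ((PySem.Str.split? text ".").getD []) = none := by
  have hsp := PySem.Str.split?_map text "."
  cases e : PySem.Str.split? text "." with
  | none => simp [e, PySem.Chars.split?] at hsp
  | some l =>
    rw [e] at hsp
    simp only [Option.map_some] at hsp
    have hsome : PySem.Chars.split? text.toList ".".toList
        = some (PySem.Chars.splitOn text.toList ".".toList) := rfl
    rw [hsome] at hsp
    have hl : List.map String.toList l = PySem.Chars.splitOn text.toList ".".toList :=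
      Option.some.inj hsp
    simp only [Option.getD_some, pvFirstHit]
    rw [List.findSome?_eq_none_iff]
    intro s hs
    rw [if_neg]
    intro hq
    simp only [pvQual, Bool.and_eq_true] at hq
    have hinfix : s.toList <:+: text.toList := by
      apply pv_splitOn_infix text.toList ".".toList
      rw [← hl]
      exact List.mem_map_of_mem hs
    have hkw : kw.toList <:+: (PySem.Chars.lower s.toList) := by
      have := hq.1
      rwa [PySem.Str.isIn_iff_infix, PySem.Str.toList_lower] at this
    have htxt : PySem.Str.isIn kw (PySem.Str.lower text) = true := by
      rw [PySem.Str.isIn_iff_infix, PySem.Str.toList_lower]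
      refine hkw.trans ?_
      simpa [PySem.Chars.lower] using hinfix.map PySem.Chars.lowerChar
    rw [h] at htxt
    exact Bool.false_ne_true htxt

theorem pv_stepB_get?_ne (s : String) (d : PySem.Dict String String) {k kw : String} (h : kw ≠ k) :
    (pvStepB s d k).get? kw = d.get? kw := by
  simp only [pvStepB]
  split_ifs <;> simp [PySem.Dict.get?_insert_of_ne d _ h]

theorem pv_stepB_contains_ne (s : String) (d : PySem.Dict String String) {k kw : String} (h : kw ≠ k) :
    (pvStepB s d k).contains kw = d.contains kw := by
  simp only [pvStepB]
  split_ifs <;> simp [PySem.Dict.contains_insert, h]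

theorem pv_stepB_get?_self (s : String) (d : PySem.Dict String String) (kw : String) :
    (pvStepB s d kw).get? kw =
      if d.contains kw = false ∧ pvQual kw s then some (PySem.Str.strip s) else d.get? kw := by
  unfold pvStepB
  by_cases hc : d.contains kw = false <;>
    by_cases hin : PySem.Chars.isIn kw.toList (PySem.Chars.lower s.toList) = true <;>
      by_cases hlen : 10 < (PySem.Chars.strip s.toList).length <;>
        simp_all [pvQual, PySem.Dict.get?_insert_self]
  rw [if_neg (by omega), if_neg (by omega)]

theorem pv_stepB_insert (s : String) (d : PySem.Dict String String) (kw : String)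
    (hc : d.contains kw = false) (hq : pvQual kw s = true) :
    pvStepB s d kw = d.insert kw (PySem.Str.strip s) := by
  simp only [pvQual] at hq
  simp at hq
  unfold pvStepB
  simp [hc, hq.1, hq.2]

-- B's keyword fold over one sentence, observed at one keyword
theorem pv_inner_get? (s : String) (ks : List String) (d : PySem.Dict String String) (kw : String) :
    ((ks.foldl (pvStepB s) d).get? kw)
    = if kw ∈ ks ∧ d.contains kw = false ∧ pvQual kw s then some (PySem.Str.strip s) else d.get? kw := by
  induction ks generalizing d with
  | nil => simp
  | cons k ks ih =>
    simp only [List.foldl_cons]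
    by_cases hk : kw = k
    · subst hk
      by_cases hc : d.contains kw = false ∧ pvQual kw s = true
      · rw [pv_stepB_insert s d kw hc.1 hc.2, ih]
        rw [if_neg (by simp [PySem.Dict.contains_insert])]
        rw [if_pos (by simp [hc.1, hc.2])]
        exact PySem.Dict.get?_insert_self d kw _
      · have hd : (pvStepB s d kw).get? kw = d.get? kw := by
          rw [pv_stepB_get?_self]; rw [if_neg (by tauto)]
        have hdc : (pvStepB s d kw).contains kw = d.contains kw := by
          rw [PySem.Dict.contains_eq_isSome_get?, PySem.Dict.contains_eq_isSome_get?, hd]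
        rw [ih, hdc, hd, if_neg (by tauto), if_neg (by tauto)]
    · rw [ih, pv_stepB_get?_ne s d hk, pv_stepB_contains_ne s d hk]
      by_cases hm : kw ∈ ks
      · simp [hm, hk]
      · simp [hm, hk]

-- B's sentence fold, observed at one keyword of the fixed list
theorem pv_outer_get? (kws : List String) (sents : List String) (d : PySem.Dict String String) (kw : String)
    (hkw : kw ∈ kws) :
    ((sents.foldl (fun d sentence => kws.foldl (pvStepB sentence) d) d).get? kw)
    = (d.get? kw).or (pvFirstHit kw sents) := by
  induction sents generalizing d with
  | nil => simp [pvFirstHit]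
  | cons s rest ih =>
    simp only [List.foldl_cons]
    rw [ih, pv_inner_get?]
    cases e : d.get? kw with
    | some v =>
      have hc : d.contains kw = true := by rw [PySem.Dict.contains_eq_isSome_get?, e]; rfl
      rw [if_neg (by simp [hc])]
      simp
    | none =>
      have hc : d.contains kw = false := by rw [PySem.Dict.contains_eq_isSome_get?, e]; rfl
      by_cases hq : pvQual kw s = true
      · rw [if_pos ⟨hkw, hc, hq⟩]
        simp [pvFirstHit, hq]
      · rw [if_neg (by tauto)]
        simp only [pvFirstHit, List.findSome?_cons, Option.none_or]
        have hnone : (if pvQual kw s = true then some (PySem.Str.strip s) else none) = none := by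
          rw [if_neg hq]
        rw [hnone]

-- A's keyword fold produces exactly the concatenation of first hits in keyword order
theorem pv_foldlA (text : String) (kws : List String) (acc : List String)
    (h : ∀ kw ∈ kws, PySem.Str.isIn kw (PySem.Str.lower text) = false →
          pvFirstHit kw ((PySem.Str.split? text ".").getD []) = none) :
    kws.foldl (fun acc kw =>
      if PySem.Str.isIn kw (PySem.Str.lower text) then
        pvScanA kw ((PySem.Str.split? text ".").getD []) acc
      else acc) acc
    = acc ++ kws.filterMap (fun kw => pvFirstHit kw ((PySem.Str.split? text ".").getD [])) := by
  induction kws generalizing acc with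
  | nil => simp
  | cons kw kws ih =>
    simp only [List.foldl_cons, List.filterMap_cons]
    by_cases hin : PySem.Str.isIn kw (PySem.Str.lower text) = true
    · rw [if_pos hin, pvScanA_eq, ih _ (fun k hk => h k (List.mem_cons_of_mem kw hk))]
      cases pvFirstHit kw ((PySem.Str.split? text ".").getD []) <;> simp
    · rw [if_neg hin, ih _ (fun k hk => h k (List.mem_cons_of_mem kw hk))]
      rw [h kw (List.mem_cons_self) (by simpa using hin)]

-- ===== VERDICT (by name: the statement is the Claim_ definition above) =====
theorem extract_deadlines_from_text_spec : Claim_equal_extract_deadlines_from_text := by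
  intro text _
  unfold Spec_extract_deadlines_from_text
  have hA := pv_foldlA text pvKeywordsA []
    (fun kw _ hk => pv_firstHit_none text kw hk)
  have hB : pvKeywordsB.filterMap (fun kw =>
      ((((PySem.Str.split? text ".").getD []).foldl
        (fun d sentence => pvKeywordsB.foldl (pvStepB sentence) d) PySem.Dict.empty).get? kw))
      = pvKeywordsB.filterMap (fun kw => pvFirstHit kw ((PySem.Str.split? text ".").getD [])) := by
    apply List.filterMap_congr
    intro kw hkw
    rw [pv_outer_get? pvKeywordsB _ _ _ hkw, PySem.Dict.get?_empty, Option.none_or]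
  have hAB : (pvKeywordsA.foldl (fun acc kw =>
      if PySem.Str.isIn kw (PySem.Str.lower text) then
        pvScanA kw ((PySem.Str.split? text ".").getD []) acc
      else acc) [])
      = pvKeywordsB.filterMap (fun kw =>
      ((((PySem.Str.split? text ".").getD []).foldl
        (fun d sentence => pvKeywordsB.foldl (pvStepB sentence) d) PySem.Dict.empty).get? kw)) := by
    rw [hA, hB]
    simp only [List.nil_append]
    rfl
  exact congrArg (fun l => PySem.List.slice l none (some 3)) hAB
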